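-- pv_equiv track=rewrite | github.com/JamesCribb/AoC2023 | Day12/day12.py | MakeSequence
-- ===== SOURCE A (Python) =====
-- def MakeSequence(baseSeq, numUnknown, n):
--     toInsert = format(n, f'0{numUnknown}b').replace('0', '.').replace('1', '#')
--     insertCounter = 0
--     testSeq = ''
--     for c in baseSeq:
--         if c != '?':
--             testSeq += c
--         else:
--             testSeq += toInsert[insertCounter]
--             insertCounter += 1
--     return testSeq
-- ===== SOURCE B (Python) =====
-- def MakeSequence(baseSeq, numUnknown, n):
--     toInsert = format(n, f'0{numUnknown}b').replace('0', '.').replace('1', '#')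
--     parts = baseSeq.split('?')
--     testSeq = parts[0]
--     for i, seg in enumerate(parts[1:]):
--         testSeq += toInsert[i] + seg
--     return testSeq
-- ===== Notes on version B (the rewrite author's own statement) =====
-- stated objective: faster
-- what changed: Replaces the character-by-character scan with a running insert counter by a split-on-'?' segment interleaving: the string is split once on '?' and rebuilt as parts[0] followed by toInsert[i] + parts[i+1] for each later segment.
import Mathlib
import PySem

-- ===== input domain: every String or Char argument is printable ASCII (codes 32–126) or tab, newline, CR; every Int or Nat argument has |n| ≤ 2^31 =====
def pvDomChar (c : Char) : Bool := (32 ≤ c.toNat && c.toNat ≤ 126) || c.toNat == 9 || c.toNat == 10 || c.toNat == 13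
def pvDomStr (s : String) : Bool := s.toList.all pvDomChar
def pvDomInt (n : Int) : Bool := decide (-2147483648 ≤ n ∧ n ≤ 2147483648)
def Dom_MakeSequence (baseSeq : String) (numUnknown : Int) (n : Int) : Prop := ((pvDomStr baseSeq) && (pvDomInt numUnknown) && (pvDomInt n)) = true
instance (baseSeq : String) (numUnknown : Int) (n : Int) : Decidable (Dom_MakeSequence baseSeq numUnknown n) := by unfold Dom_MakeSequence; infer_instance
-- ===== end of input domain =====

-- B rebuilds the string by splitting once on '?' and interleaving the pattern characters between
-- the segments, instead of A's character-by-character scan with a running insert counter (alternative decomposition).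

-- ===== PORT A =====
-- shared by both ports (same first line in both Pythons):
-- format(n, f'0{numUnknown}b') = format(n, 'b').zfill(numUnknown), exact for numUnknown ≥ 0 (Pre_)
def pvToInsert (numUnknown : Int) (n : Int) : List Char :=
  PySem.Chars.replace (PySem.Chars.replace
    (PySem.Chars.zfill (PySem.Int.toBinChars n) numUnknown) ['0'] ['.']) ['1'] ['#']

def MakeSequence (baseSeq : String) (numUnknown : Int) (n : Int) : String :=
  let toInsert := pvToInsert numUnknown n
  -- state = (insertCounter, testSeq); toInsert[insertCounter] is in range under Pre_ (pyGetD total form)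
  let st := baseSeq.toList.foldl
    (fun (st : Int × List Char) c =>
      if c ≠ '?' then (st.1, st.2 ++ [c])
      else (st.1 + 1, st.2 ++ [PySem.List.pyGetD toInsert st.1 ' ']))
    (0, [])
  String.ofList st.2

-- ===== PORT B =====
def MakeSequence_alt (baseSeq : String) (numUnknown : Int) (n : Int) : String :=
  let toInsert := pvToInsert numUnknown n
  let parts := PySem.Chars.splitOn baseSeq.toList ['?']
  let testSeq := parts.headD []      -- parts[0]; splitOn is never empty
  -- toInsert[i] is in range under Pre_ (pyGetD total form)
  let r := (PySem.List.enumerate parts.tail).foldl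
    (fun acc p => acc ++ [PySem.List.pyGetD toInsert p.1 ' '] ++ p.2) testSeq
  String.ofList r

-- ===== PRECONDITION & SPEC =====
-- Pre_ excludes exactly the inputs where Python A raises: numUnknown < 0 (ValueError from the
-- format spec f'0{numUnknown}b') and more '?' in baseSeq than characters in toInsert (IndexError).
-- pvBinLen n = (toBinChars n).length, in closed form so Pre_ decides without building strings
def pvBinLen (n : Int) : Nat := (if n < 0 then 1 else 0) + max 1 (PySem.Int.bitLength n)

def Pre_MakeSequence (baseSeq : String) (numUnknown : Int) (n : Int) : Prop :=
  0 ≤ numUnknown ∧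
  PySem.Chars.count baseSeq.toList ['?'] ≤ max (pvBinLen n) numUnknown.toNat
instance (baseSeq : String) (numUnknown : Int) (n : Int) : Decidable (Pre_MakeSequence baseSeq numUnknown n) := by unfold Pre_MakeSequence; infer_instance

def pvWitness_MakeSequence : String × Int × Int := ("a?b?c", 2, 1)

def Spec_MakeSequence (baseSeq : String) (numUnknown : Int) (n : Int) (out : String) : Prop := out = MakeSequence_alt baseSeq numUnknown n
instance (baseSeq : String) (numUnknown : Int) (n : Int) (out : String) : Decidable (Spec_MakeSequence baseSeq numUnknown n out) := by unfold Spec_MakeSequence; infer_instance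

-- ===== CLAIM (what is proved, stated in full; the proofs are below) =====
def Claim_equal_MakeSequence : Prop := ∀ (baseSeq : String) (numUnknown : Int) (n : Int), Dom_MakeSequence baseSeq numUnknown n → Pre_MakeSequence baseSeq numUnknown n → Spec_MakeSequence baseSeq numUnknown n (MakeSequence baseSeq numUnknown n)

-- ===== LEMMAS AND PROOFS =====

-- structural characterisation of splitting on the single character '?':
-- pvSplit1 cs = (first segment, later segments)
def pvSplit1 : List Char → List Char × List (List Char)
  | [] => ([], [])
  | c :: cs =>
    let p := pvSplit1 cs
    if c = '?' then ([], p.1 :: p.2) else (c :: p.1, p.2)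

-- interleave: g k, segment, g (k+1), segment, …
def pvIlv (g : Int → Char) : Int → List (List Char) → List Char
  | _, [] => []
  | k, s :: ss => g k :: (s ++ pvIlv g (k + 1) ss)

theorem pv_go_eq : ∀ (fuel : Nat) (l cur : List Char) (acc : List (List Char)), l.length ≤ fuel →
    PySem.Chars.splitOn.go ['?'] fuel l cur acc =
      acc.reverse ++ ((cur.reverse ++ (pvSplit1 l).1) :: (pvSplit1 l).2)
  | 0, l, cur, acc, h => by
    have : l = [] := List.eq_nil_of_length_eq_zero (Nat.le_zero.mp h)
    subst this
    simp [PySem.Chars.splitOn.go, pvSplit1]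
  | fuel + 1, [], cur, acc, h => by
    simp [PySem.Chars.splitOn.go, pvSplit1]
  | fuel + 1, c :: rest, cur, acc, h => by
    have hr : rest.length ≤ fuel := by simpa using h
    by_cases hc : c = '?'
    · subst hc
      rw [show PySem.Chars.splitOn.go ['?'] (fuel+1) ('?' :: rest) cur acc
            = PySem.Chars.splitOn.go ['?'] fuel rest [] (cur.reverse :: acc) by
          simp [PySem.Chars.splitOn.go, List.isPrefixOf]]
      rw [pv_go_eq fuel rest [] (cur.reverse :: acc) hr]
      simp [pvSplit1]
    · have hp : (['?'].isPrefixOf (c :: rest)) = false := by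
        simp [List.isPrefixOf, Ne.symm hc]
      rw [show PySem.Chars.splitOn.go ['?'] (fuel+1) (c :: rest) cur acc
            = PySem.Chars.splitOn.go ['?'] fuel rest (c :: cur) acc by
          simp [PySem.Chars.splitOn.go, hp]]
      rw [pv_go_eq fuel rest (c :: cur) acc hr]
      simp [pvSplit1, hc]

theorem pv_splitOn_eq (cs : List Char) :
    PySem.Chars.splitOn cs ['?'] = (pvSplit1 cs).1 :: (pvSplit1 cs).2 := by
  unfold PySem.Chars.splitOn
  rw [pv_go_eq (cs.length + 1) cs [] [] (by omega)]
  simp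

theorem pv_foldA (g : Int → Char) : ∀ (cs : List Char) (k : Int) (acc : List Char),
    (cs.foldl (fun (st : Int × List Char) c =>
        if c ≠ '?' then (st.1, st.2 ++ [c]) else (st.1 + 1, st.2 ++ [g st.1])) (k, acc)).2
    = acc ++ (pvSplit1 cs).1 ++ pvIlv g k (pvSplit1 cs).2
  | [], k, acc => by simp [pvSplit1, pvIlv]
  | c :: cs, k, acc => by
    by_cases hc : c = '?'
    · subst hc
      have hi : (if ('?' : Char) ≠ '?' then (k, acc ++ ['?']) else (k + 1, acc ++ [g k]))
          = (k + 1, acc ++ [g k]) := if_neg (by simp)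
      rw [List.foldl_cons, hi, pv_foldA g cs (k + 1) (acc ++ [g k])]
      simp [pvSplit1, pvIlv]
    · have hi : (if c ≠ '?' then (k, acc ++ [c]) else (k + 1, acc ++ [g k])) = (k, acc ++ [c]) :=
        if_pos hc
      rw [List.foldl_cons, hi, pv_foldA g cs k (acc ++ [c])]
      simp [pvSplit1, hc]

theorem pv_foldB (g : Int → Char) : ∀ (ss : List (List Char)) (k : Int) (first : List Char),
    (PySem.List.enumerate ss k).foldl (fun acc p => acc ++ [g p.1] ++ p.2) first
    = first ++ pvIlv g k ss
  | [], k, first => by simp [PySem.List.enumerate_nil, pvIlv]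
  | s :: ss, k, first => by
    rw [PySem.List.enumerate_cons, List.foldl_cons, pv_foldB g ss (k + 1) (first ++ [g k] ++ s)]
    simp [pvIlv]

-- ===== VERDICT (by name: the statement is the Claim_ definition above) =====
theorem MakeSequence_spec : Claim_equal_MakeSequence := by
  intro baseSeq numUnknown n _ _
  show MakeSequence baseSeq numUnknown n = MakeSequence_alt baseSeq numUnknown n
  unfold MakeSequence MakeSequence_alt
  simp only [pv_splitOn_eq, List.headD_cons, List.tail_cons]
  rw [pv_foldA (fun k => PySem.List.pyGetD (pvToInsert numUnknown n) k ' ') baseSeq.toList 0 [],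
      pv_foldB (fun k => PySem.List.pyGetD (pvToInsert numUnknown n) k ' ')]
  simp
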